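-- pv_equiv track=rewrite | github.com/tiendm1991/python | DynamicPrograming/minimumSquare.py | minimumSquare
-- ===== SOURCE A (Python) =====
-- def minimumSquare(a, b):
--     n = min(a,b)
--     m = max(a,b)
--     dp = [[99 for i in range(m+1)] for j in range(n+1)]
--     for i in range(1, n+1):
--         dp[i][i] = 1
--     for j in range(1, m+1):
--         dp[1][j] = j
--         dp[0][j] = 0
--     for i in range(2, n+1):
--         for j in range(i+1, m+1):
--             for k in range(1, i//2+1):
--                 dp[i][j] = min(dp[i][j], dp[k][j] + dp[i-k][j])
--             dp[i][j] = min(dp[i][j], (j//i) + dp[j%i][i])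
--     return dp[n][m]
-- ===== SOURCE B (Python) =====
-- def _column(j, rmax, cols):
--     # v[r] = min squares for an r x j rectangle under A's recurrence, rows 0..rmax
--     v = [0]
--     for r in range(1, rmax + 1):
--         if r == j:
--             v.append(1)
--         elif r == 1:
--             v.append(j)
--         else:
--             best = 99
--             for k in range(1, r // 2 + 1):
--                 best = min(best, v[k] + v[r - k])
--             best = min(best, j // r + cols[r][j % r])
--             v.append(best)
--     return v
--
--
-- def minimumSquare(a, b):
--     n, m = min(a, b), max(a, b)
--     cols = []
--     for c in range(n + 1):
--         cols.append(_column(c, c - 1, cols))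
--     return _column(m, n, cols)[n]
-- ===== Notes on version B (the rewrite author's own statement) =====
-- stated objective: faster
-- what changed: A fills a full (n+1)x(m+1) bottom-up table; B computes only the cells the recurrence can reach, column by column: full columns 1..n plus the single column m, so time drops from O(n^2*m) to O(n^3) and memory from O(n*m) to O(n^2).
-- intended difference: On (a,b)=(0,0) A returns 99, the untouched dp-sentinel for an unreachable cell, while B returns 0, the intended number of squares tiling an empty rectangle. — e.g. on minimumSquare(0, 0): A returns 99, B returns 0
import Mathlib
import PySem

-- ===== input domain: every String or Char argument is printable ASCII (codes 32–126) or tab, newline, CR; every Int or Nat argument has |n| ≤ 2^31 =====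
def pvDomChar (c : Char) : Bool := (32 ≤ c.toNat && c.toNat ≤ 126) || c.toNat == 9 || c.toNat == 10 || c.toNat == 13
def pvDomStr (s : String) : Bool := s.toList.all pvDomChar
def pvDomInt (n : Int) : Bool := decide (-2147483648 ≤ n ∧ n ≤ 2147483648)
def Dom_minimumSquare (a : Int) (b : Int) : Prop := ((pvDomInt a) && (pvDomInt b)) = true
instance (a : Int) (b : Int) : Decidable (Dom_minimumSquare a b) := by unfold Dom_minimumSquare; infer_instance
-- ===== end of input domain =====

-- B replaces A's full (n+1)×(m+1) bottom-up table by a column-by-column computation of only the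
-- reachable cells (full columns 1..n plus the single column m); equivalence is about the return value.

-- ===== PORT A =====
-- dp is A's (n+1)×(m+1) list-of-lists table; get2/set2 are dp[i][j] reads/writes
-- (all of A's accesses are in range on every input admitted by Pre_, so the getD default is never read).
def get2 (d : List (List Int)) (p q : Nat) : Int := (d.getD p []).getD q 0

def set2 (d : List (List Int)) (i j : Nat) (v : Int) : List (List Int) :=
  d.set i ((d.getD i []).set j v)

def minimumSquare (a : Int) (b : Int) : Int :=
  let n : Nat := (min a b).toNat
  let m : Nat := (max a b).toNat
  let dp := List.replicate (n + 1) (List.replicate (m + 1) (99 : Int))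
  -- for i in range(1, n+1): dp[i][i] = 1
  let dp := (List.range' 1 n).foldl (fun d i => set2 d i i 1) dp
  -- for j in range(1, m+1): dp[1][j] = j ; dp[0][j] = 0
  let dp := (List.range' 1 m).foldl (fun d j => set2 (set2 d 1 j (j : Int)) 0 j 0) dp
  -- for i in range(2, n+1): for j in range(i+1, m+1): …
  let dp := (List.range' 2 (n - 1)).foldl (fun d i =>
      (List.range' (i + 1) (m - i)).foldl (fun d j =>
        let d := (List.range' 1 (i / 2)).foldl
            (fun d k => set2 d i j (min (get2 d i j) (get2 d k j + get2 d (i - k) j))) d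
        set2 d i j (min (get2 d i j) (((j / i : Nat) : Int) + get2 d (j % i) i))) d) dp
  get2 dp n m

-- ===== PORT B =====
-- _column(j, rmax, cols): rows 0..rmax of column j, reading earlier columns from cols
def colB (j rmax : Nat) (cols : List (List Int)) : List Int :=
  (List.range' 1 rmax).foldl (fun v r =>
    if r = j then v ++ [1]
    else if r = 1 then v ++ [(j : Int)]
    else
      let best := (List.range' 1 (r / 2)).foldl
          (fun acc k => min acc (v.getD k 0 + v.getD (r - k) 0)) 99
      let best := min best (((j / r : Nat) : Int) + (cols.getD r []).getD (j % r) 0)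
      v ++ [best]) [0]

def minimumSquare_alt (a : Int) (b : Int) : Int :=
  let n : Nat := (min a b).toNat
  let m : Nat := (max a b).toNat
  let cols := (List.range (n + 1)).foldl (fun cols c => cols ++ [colB c (c - 1) cols]) []
  (colB m n cols).getD n 0

-- ===== PRECONDITION & SPEC =====
-- Pre_: A raises IndexError whenever min(a,b) < 0 or exactly one argument is 0; it returns on the rest.
def Pre_minimumSquare (a : Int) (b : Int) : Prop := (1 ≤ a ∧ 1 ≤ b) ∨ (a = 0 ∧ b = 0)
instance (a : Int) (b : Int) : Decidable (Pre_minimumSquare a b) := by unfold Pre_minimumSquare; infer_instance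
def pvWitness_minimumSquare : Int × Int := (3, 7)

-- On (a,b)=(0,0) A returns 99, the untouched dp-sentinel for an unreachable cell, while B returns 0,
-- the intended number of squares tiling an empty rectangle.
def D_minimumSquare (a : Int) (b : Int) : Prop := a = 0 ∧ b = 0
instance (a : Int) (b : Int) : Decidable (D_minimumSquare a b) := by unfold D_minimumSquare; infer_instance

def Spec_minimumSquare (a : Int) (b : Int) (out : Int) : Prop := ¬ D_minimumSquare a b → out = minimumSquare_alt a b
instance (a : Int) (b : Int) (out : Int) : Decidable (Spec_minimumSquare a b out) := by unfold Spec_minimumSquare; infer_instance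

def pvDiffWitness_minimumSquare : Int × Int := (0, 0)
def pvDiffWitnessOut_minimumSquare : Int × Int := (99, 0)

-- ===== CLAIM (what is proved, stated in full; the proofs are below) =====
def Claim_unchanged_minimumSquare : Prop := ∀ (a : Int) (b : Int), Dom_minimumSquare a b → Pre_minimumSquare a b → Spec_minimumSquare a b (minimumSquare a b)
def Claim_changed_minimumSquare : Prop := Dom_minimumSquare (pvDiffWitness_minimumSquare.1) (pvDiffWitness_minimumSquare.2) ∧ Pre_minimumSquare (pvDiffWitness_minimumSquare.1) (pvDiffWitness_minimumSquare.2) ∧ D_minimumSquare (pvDiffWitness_minimumSquare.1) (pvDiffWitness_minimumSquare.2) ∧ minimumSquare (pvDiffWitness_minimumSquare.1) (pvDiffWitness_minimumSquare.2) = pvDiffWitnessOut_minimumSquare.1 ∧ minimumSquare_alt (pvDiffWitness_minimumSquare.1) (pvDiffWitness_minimumSquare.2) = pvDiffWitnessOut_minimumSquare.2 ∧ pvDiffWitnessOut_minimumSquare.1 ≠ pvDiffWitnessOut_minimumSquare.2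
def Claim_exact_minimumSquare : Prop := ∀ (a : Int) (b : Int), Dom_minimumSquare a b → Pre_minimumSquare a b → D_minimumSquare a b → minimumSquare a b ≠ minimumSquare_alt a b

-- ===== LEMMAS AND PROOFS =====

-- the common recurrence: f i j = A's dp[i][j] = B's column j, row i  (i ≤ j)
def fB (i j : Nat) : Int :=
  if h0 : i = 0 then 0
  else if hij : i = j then 1
  else if h1 : i = 1 then (j : Int)
  else
    let best := (List.range' 1 (i / 2)).attach.foldl
        (fun acc k => min acc (fB k.1 j + fB (i - k.1) j)) 99
    min best (((j / i : Nat) : Int) + fB (j % i) i)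
termination_by i
decreasing_by
  · rcases List.mem_range'_1.mp k.2 with ⟨hk1, hk2⟩; omega
  · rcases List.mem_range'_1.mp k.2 with ⟨hk1, hk2⟩; omega
  · exact Nat.mod_lt _ (by omega)

theorem fB_zero (j : Nat) : fB 0 j = 0 := by simp [fB]
theorem fB_diag (i : Nat) (h : i ≠ 0) : fB i i = 1 := by rw [fB]; simp [h]
theorem fB_one (j : Nat) (h : j ≠ 1) : fB 1 j = (j : Int) := by rw [fB]; simp [Ne.symm h]

theorem fB_step (i j : Nat) (h2 : 2 ≤ i) (hij : i ≠ j) :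
    fB i j = min ((List.range' 1 (i / 2)).foldl
        (fun acc k => min acc (fB k j + fB (i - k) j)) 99)
      (((j / i : Nat) : Int) + fB (j % i) i) := by
  rw [fB]
  simp [show ¬ i = 0 by omega, hij, show ¬ i = 1 by omega]

-- ---------- A side ----------
def Wf (nn mm : Nat) (d : List (List Int)) : Prop :=
  d.length = nn + 1 ∧ ∀ r ∈ d, r.length = mm + 1

theorem wf_set2 (nn mm : Nat) (d : List (List Int)) (hwf : Wf nn mm d)
    (i j : Nat) (hi : i ≤ nn) (v : Int) : Wf nn mm (set2 d i j v) := by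
  obtain ⟨hlen, hrows⟩ := hwf
  refine ⟨by simp [set2, hlen], ?_⟩
  intro r hr
  rcases List.mem_or_eq_of_mem_set hr with h | h
  · exact hrows r h
  · subst h
    rw [List.length_set]
    have hid : i < d.length := by omega
    rw [List.getD_eq_getElem _ _ hid]
    exact hrows _ (List.getElem_mem hid)

theorem getD_set_row (d : List (List Int)) (i p : Nat) (r : List Int) (hne : p ≠ i) :
    (d.set i r).getD p [] = d.getD p [] := by
  rcases Nat.lt_or_ge p d.length with h | h
  · rw [List.getD_eq_getElem _ _ (by simpa using h), List.getD_eq_getElem _ _ h,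
      List.getElem_set_ne (by omega)]
  · rw [List.getD_eq_default _ _ (by simpa using h), List.getD_eq_default _ _ h]

theorem get2_set2 (nn mm : Nat) (d : List (List Int)) (hwf : Wf nn mm d)
    (i j : Nat) (hi : i ≤ nn) (hj : j ≤ mm) (v : Int) (p q : Nat) :
    get2 (set2 d i j v) p q = if p = i ∧ q = j then v else get2 d p q := by
  obtain ⟨hlen, hrows⟩ := hwf
  have hid : i < d.length := by omega
  have hrl : (d.getD i []).length = mm + 1 := by
    rw [List.getD_eq_getElem _ _ hid]
    exact hrows _ (List.getElem_mem hid)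
  by_cases hp : p = i
  · subst hp
    have hrow : (set2 d p j v).getD p [] = (d.getD p []).set j v := by
      unfold set2
      rw [List.getD_eq_getElem _ _ (by simpa using hid), List.getElem_set_self (by simpa using hid)]
    unfold get2
    rw [hrow]
    by_cases hq : q = j
    · subst hq
      rw [if_pos ⟨rfl, rfl⟩,
        List.getD_eq_getElem _ _ (by rw [List.length_set]; omega),
        List.getElem_set_self (by rw [List.length_set]; omega)]
    · rw [if_neg (by tauto)]
      rcases Nat.lt_or_ge q (d.getD p []).length with h | h
      · rw [List.getD_eq_getElem _ _ (by simpa using h), List.getD_eq_getElem _ _ h,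
          List.getElem_set_ne (by omega)]
      · rw [List.getD_eq_default _ _ (by simpa using h), List.getD_eq_default _ _ h]
  · rw [if_neg (by tauto)]
    unfold get2 set2
    rw [getD_set_row d i p _ hp]

theorem set2_get2_self (d : List (List Int)) (i j : Nat) (hi : i < d.length)
    (hj : j < (d.getD i []).length) : set2 d i j (get2 d i j) = d := by
  unfold set2 get2
  rw [List.getD_eq_getElem _ _ hi] at hj ⊢
  rw [List.getD_eq_getElem _ _ hj, List.set_getElem_self hj, List.set_getElem_self hi]

theorem set2_same (d : List (List Int)) (i j : Nat) (hi : i < d.length) (v w : Int) :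
    set2 (set2 d i j v) i j w = set2 d i j w := by
  unfold set2
  have h1 : (d.set i ((d.getD i []).set j v)).getD i [] = (d.getD i []).set j v := by
    rw [List.getD_eq_getElem _ _ (by simpa using hi)]
    exact List.getElem_set_self (by simpa using hi)
  rw [h1, List.set_set, List.set_set]

-- cells already holding their final value when the outer loop is about to process (i,j)
def Dn (nn mm i j p q : Nat) : Prop :=
  (p = 0 ∧ 1 ≤ q ∧ q ≤ mm) ∨ (p = 1 ∧ 1 ≤ q ∧ q ≤ mm) ∨
  (1 ≤ p ∧ p = q ∧ p ≤ nn) ∨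
  (2 ≤ p ∧ p ≤ nn ∧ p < q ∧ q ≤ mm ∧ (p < i ∨ (p = i ∧ q < j)))

def TblInv (nn mm : Nat) (d : List (List Int)) (i j : Nat) : Prop :=
  Wf nn mm d ∧
  (∀ p q, Dn nn mm i j p q → get2 d p q = fB p q) ∧
  (∀ p q, 2 ≤ p → p ≤ nn → p < q → q ≤ mm → ¬ (p < i ∨ (p = i ∧ q < j)) → get2 d p q = 99)

theorem innerK_fold (nn mm i j : Nat) (hi : i ≤ nn) (hj : j ≤ mm) :
    ∀ (L : List Nat) (d : List (List Int)), Wf nn mm d →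
    (∀ k ∈ L, k ≠ i ∧ i - k ≠ i ∧ get2 d k j = fB k j ∧ get2 d (i - k) j = fB (i - k) j) →
    L.foldl (fun d k => set2 d i j (min (get2 d i j) (get2 d k j + get2 d (i - k) j))) d
      = set2 d i j (L.foldl (fun acc k => min acc (fB k j + fB (i - k) j)) (get2 d i j)) := by
  intro L
  induction L with
  | nil =>
    intro d hwf _
    simp only [List.foldl_nil]
    obtain ⟨hlen, hrows⟩ := hwf
    have hid : i < d.length := by omega
    have hrl : (d.getD i []).length = mm + 1 := by
      rw [List.getD_eq_getElem _ _ hid]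
      exact hrows _ (List.getElem_mem hid)
    rw [set2_get2_self d i j hid (by omega)]
  | cons k L ih =>
    intro d hwf hL
    obtain ⟨hk, hik, hdk, hdik⟩ := hL k (by simp)
    simp only [List.foldl_cons]
    have hwf' := wf_set2 nn mm d hwf i j hi (min (get2 d i j) (get2 d k j + get2 d (i - k) j))
    rw [ih _ hwf' ?_]
    · rw [set2_same _ _ _ (by obtain ⟨hl, _⟩ := hwf; omega)]
      congr 1
      rw [get2_set2 nn mm d hwf i j hi hj _ i j, if_pos ⟨rfl, rfl⟩, hdk, hdik]
    · intro k' hk'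
      obtain ⟨h1, h2, h3, h4⟩ := hL k' (by simp [hk'])
      refine ⟨h1, h2, ?_, ?_⟩
      · rw [get2_set2 nn mm d hwf i j hi hj _ k' j, if_neg (by tauto), h3]
      · rw [get2_set2 nn mm d hwf i j hi hj _ (i - k') j, if_neg (by tauto), h4]

theorem step_cell (nn mm i j : Nat) (d : List (List Int)) (hInv : TblInv nn mm d i j)
    (h2 : 2 ≤ i) (hin : i ≤ nn) (hij : i < j) (hjm : j ≤ mm) (hnm : nn ≤ mm) :
    TblInv nn mm
      (set2 ((List.range' 1 (i / 2)).foldl (fun d k => set2 d i j (min (get2 d i j) (get2 d k j + get2 d (i - k) j))) d)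
        i j (min (get2 ((List.range' 1 (i / 2)).foldl (fun d k => set2 d i j (min (get2 d i j) (get2 d k j + get2 d (i - k) j))) d) i j)
          (((j / i : Nat) : Int) +
            get2 ((List.range' 1 (i / 2)).foldl (fun d k => set2 d i j (min (get2 d i j) (get2 d k j + get2 d (i - k) j))) d) (j % i) i)))
      i (j + 1) := by
  obtain ⟨hwf, hDone, hFresh⟩ := hInv
  have hdij : get2 d i j = 99 := hFresh i j h2 hin hij hjm (by omega)
  have hreads : ∀ k ∈ List.range' 1 (i / 2),
      k ≠ i ∧ i - k ≠ i ∧ get2 d k j = fB k j ∧ get2 d (i - k) j = fB (i - k) j := by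
    intro k hk
    rcases List.mem_range'_1.mp hk with ⟨hk1, hk2⟩
    have hki : k < i := by omega
    refine ⟨by omega, by omega, hDone _ _ (by unfold Dn; omega), hDone _ _ (by unfold Dn; omega)⟩
  rw [innerK_fold nn mm i j hin hjm _ d hwf hreads]
  have hmodi : j % i < i := Nat.mod_lt _ (by omega)
  have hmod : get2 d (j % i) i = fB (j % i) i := hDone _ _ (by unfold Dn; omega)
  have hwf1 := wf_set2 nn mm d hwf i j hin
    ((List.range' 1 (i / 2)).foldl (fun acc k => min acc (fB k j + fB (i - k) j)) (get2 d i j))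
  refine ⟨wf_set2 nn mm _ hwf1 i j hin _, ?_, ?_⟩
  · intro p q hpq
    by_cases hcell : p = i ∧ q = j
    · obtain ⟨hp, hq⟩ := hcell; subst hp; subst hq
      rw [get2_set2 nn mm _ hwf1 p q hin hjm _ p q, if_pos ⟨rfl, rfl⟩,
        get2_set2 nn mm d hwf p q hin hjm _ p q, if_pos ⟨rfl, rfl⟩,
        get2_set2 nn mm d hwf p q hin hjm _ (q % p) p, if_neg (by omega),
        hdij, hmod, fB_step p q h2 (by omega)]
    · rw [get2_set2 nn mm _ hwf1 i j hin hjm _ p q, if_neg hcell,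
        get2_set2 nn mm d hwf i j hin hjm _ p q, if_neg hcell]
      apply hDone
      unfold Dn at hpq ⊢
      omega
  · intro p q hp2 hpn hpq hqm hprog
    have hcell : ¬ (p = i ∧ q = j) := by omega
    rw [get2_set2 nn mm _ hwf1 i j hin hjm _ p q, if_neg hcell,
      get2_set2 nn mm d hwf i j hin hjm _ p q, if_neg hcell]
    exact hFresh p q hp2 hpn hpq hqm (by omega)

theorem row_loop (nn mm i : Nat) (h2 : 2 ≤ i) (hin : i ≤ nn) (hnm : nn ≤ mm) :
    ∀ (cnt j0 : Nat) (d : List (List Int)), i < j0 → j0 + cnt = mm + 1 → TblInv nn mm d i j0 →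
    TblInv nn mm ((List.range' j0 cnt).foldl (fun d j =>
        let d := (List.range' 1 (i / 2)).foldl
            (fun d k => set2 d i j (min (get2 d i j) (get2 d k j + get2 d (i - k) j))) d
        set2 d i j (min (get2 d i j) (((j / i : Nat) : Int) + get2 d (j % i) i))) d) i (j0 + cnt) := by
  intro cnt
  induction cnt with
  | zero => intro j0 d _ _ h; simpa using h
  | succ c ih =>
    intro j0 d hj0 hend hInv
    rw [List.range'_succ, List.foldl_cons]
    have := ih (j0 + 1) _ (by omega) (by omega)
      (step_cell nn mm i j0 d hInv h2 hin hj0 (by omega) hnm)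
    have harr : j0 + 1 + c = j0 + (c + 1) := by omega
    rw [harr] at this
    exact this

theorem inv_shift (nn mm i : Nat) (d : List (List Int)) (h : TblInv nn mm d i (mm + 1)) :
    TblInv nn mm d (i + 1) (i + 2) := by
  obtain ⟨hwf, hD, hF⟩ := h
  refine ⟨hwf, fun p q hpq => hD p q (by unfold Dn at hpq ⊢; omega),
    fun p q hp2 hpn hpq hqm hprog => hF p q hp2 hpn hpq hqm (by omega)⟩

theorem outer_loop (nn mm : Nat) (hnm : nn ≤ mm) :
    ∀ (cnt i0 : Nat) (d : List (List Int)), 2 ≤ i0 → i0 + cnt ≤ nn + 1 → TblInv nn mm d i0 (i0 + 1) →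
    TblInv nn mm ((List.range' i0 cnt).foldl (fun d i =>
      (List.range' (i + 1) (mm - i)).foldl (fun d j =>
        let d := (List.range' 1 (i / 2)).foldl
            (fun d k => set2 d i j (min (get2 d i j) (get2 d k j + get2 d (i - k) j))) d
        set2 d i j (min (get2 d i j) (((j / i : Nat) : Int) + get2 d (j % i) i))) d) d)
      (i0 + cnt) (i0 + cnt + 1) := by
  intro cnt
  induction cnt with
  | zero => intro i0 d _ _ h; simpa using h
  | succ c ih =>
    intro i0 d h2 hend hInv
    rw [List.range'_succ, List.foldl_cons]
    have hrow := row_loop nn mm i0 h2 (by omega) hnm (mm - i0) (i0 + 1) d (by omega) (by omega) hInv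
    have heq : i0 + 1 + (mm - i0) = mm + 1 := by omega
    rw [heq] at hrow
    have := ih (i0 + 1) _ (by omega) (by omega) (inv_shift nn mm i0 _ hrow)
    have harr : i0 + 1 + c = i0 + (c + 1) := by omega
    rw [harr] at this
    exact this

-- the two base loops
theorem diag_loop (nn mm : Nat) (hnm : nn ≤ mm) (s : Nat) :
    ∀ (cnt : Nat) (d : List (List Int)), Wf nn mm d → s + cnt ≤ nn + 1 →
    Wf nn mm ((List.range' s cnt).foldl (fun d i => set2 d i i 1) d) ∧
    ∀ p q, get2 ((List.range' s cnt).foldl (fun d i => set2 d i i 1) d) p q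
      = if p = q ∧ s ≤ p ∧ p < s + cnt then 1 else get2 d p q := by
  intro cnt
  induction cnt generalizing s with
  | zero =>
    intro d hwf _
    refine ⟨by simpa using hwf, ?_⟩
    intro p q
    simp only [List.range'_zero, List.foldl_nil]
    split_ifs <;> first | rfl | (exfalso; omega)
  | succ c ih =>
    intro d hwf hle
    rw [List.range'_succ, List.foldl_cons]
    have hwf' := wf_set2 nn mm d hwf s s (by omega) 1
    obtain ⟨hwfo, hget⟩ := ih (s + 1) _ hwf' (by omega)
    refine ⟨hwfo, ?_⟩
    intro p q
    rw [hget p q, get2_set2 nn mm d hwf s s (by omega) (by omega) 1 p q]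
    split_ifs <;> first | rfl | omega | (exfalso; omega)

theorem base_loop (nn mm : Nat) (s : Nat) :
    ∀ (cnt : Nat) (d : List (List Int)), Wf nn mm d → 1 ≤ nn → s + cnt ≤ mm + 1 →
    Wf nn mm ((List.range' s cnt).foldl (fun d j => set2 (set2 d 1 j (j : Int)) 0 j 0) d) ∧
    ∀ p q, get2 ((List.range' s cnt).foldl (fun d j => set2 (set2 d 1 j (j : Int)) 0 j 0) d) p q
      = if p = 0 ∧ s ≤ q ∧ q < s + cnt then 0
        else if p = 1 ∧ s ≤ q ∧ q < s + cnt then (q : Int) else get2 d p q := by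
  intro cnt
  induction cnt generalizing s with
  | zero =>
    intro d hwf _ _
    refine ⟨by simpa using hwf, ?_⟩
    intro p q
    simp only [List.range'_zero, List.foldl_nil]
    split_ifs <;> first | rfl | (exfalso; omega)
  | succ c ih =>
    intro d hwf hnn hle
    rw [List.range'_succ, List.foldl_cons]
    have hwf1 := wf_set2 nn mm d hwf 1 s (by omega) (s : Int)
    have hwf2 := wf_set2 nn mm _ hwf1 0 s (by omega) 0
    obtain ⟨hwfo, hget⟩ := ih (s + 1) _ hwf2 hnn (by omega)
    refine ⟨hwfo, ?_⟩
    intro p q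
    rw [hget p q, get2_set2 nn mm _ hwf1 0 s (by omega) (by omega) 0 p q,
      get2_set2 nn mm d hwf 1 s (by omega) (by omega) (s : Int) p q]
    split_ifs <;> first | rfl | omega | (exfalso; omega)

-- A's table equals fB at (n, m)
theorem portA_eq_fB (nn mm : Nat) (h1 : 1 ≤ nn) (hnm : nn ≤ mm) :
    get2 ((List.range' 2 (nn - 1)).foldl (fun d i =>
      (List.range' (i + 1) (mm - i)).foldl (fun d j =>
        let d := (List.range' 1 (i / 2)).foldl
            (fun d k => set2 d i j (min (get2 d i j) (get2 d k j + get2 d (i - k) j))) d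
        set2 d i j (min (get2 d i j) (((j / i : Nat) : Int) + get2 d (j % i) i))) d)
      ((List.range' 1 mm).foldl (fun d j => set2 (set2 d 1 j (j : Int)) 0 j 0)
        ((List.range' 1 nn).foldl (fun d i => set2 d i i 1)
          (List.replicate (nn + 1) (List.replicate (mm + 1) (99 : Int)))))) nn mm
    = fB nn mm := by
  have hwf0 : Wf nn mm (List.replicate (nn + 1) (List.replicate (mm + 1) (99 : Int))) := by
    refine ⟨by simp, ?_⟩
    intro r hr
    rw [List.eq_of_mem_replicate hr]
    simp
  have hget0 : ∀ p q, p ≤ nn → q ≤ mm →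
      get2 (List.replicate (nn + 1) (List.replicate (mm + 1) (99 : Int))) p q = 99 := by
    intro p q hp hq
    unfold get2
    have hrow : (List.replicate (nn + 1) (List.replicate (mm + 1) (99 : Int))).getD p []
        = List.replicate (mm + 1) (99 : Int) := by
      rw [List.getD_eq_getElem _ _ (by simp; omega)]
      simp
    rw [hrow, List.getD_eq_getElem _ _ (by simp; omega)]
    simp
  obtain ⟨hwfd, hgetd⟩ := diag_loop nn mm hnm 1 nn _ hwf0 (by omega)
  obtain ⟨hwfb, hgetb⟩ := base_loop nn mm 1 mm _ hwfd h1 (by omega)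
  have hInv2 : TblInv nn mm
      ((List.range' 1 mm).foldl (fun d j => set2 (set2 d 1 j (j : Int)) 0 j 0)
        ((List.range' 1 nn).foldl (fun d i => set2 d i i 1)
          (List.replicate (nn + 1) (List.replicate (mm + 1) (99 : Int))))) 2 3 := by
    refine ⟨hwfb, ?_, ?_⟩
    · intro p q hpq
      rw [hgetb, hgetd]
      unfold Dn at hpq
      rcases hpq with ⟨hp, hq1, hq2⟩ | ⟨hp, hq1, hq2⟩ | ⟨hp1, hpq, hpn⟩ | h
      · rw [if_pos (by omega)]; subst hp; rw [fB_zero]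
      · subst hp
        rw [if_neg (by omega), if_pos (by omega)]
        by_cases hq : q = 1
        · subst hq; rw [fB_diag 1 (by omega)]; norm_num
        · rw [fB_one q hq]
      · subst hpq
        by_cases hp : p = 1
        · subst hp; rw [if_neg (by omega), if_pos (by omega), fB_diag 1 (by omega)]; norm_num
        · rw [if_neg (by omega), if_neg (by omega), if_pos (by omega), fB_diag p (by omega)]
      · exact absurd h (by omega)
    · intro p q hp2 hpn hpq hqm _
      rw [hgetb, hgetd]
      rw [if_neg (by omega), if_neg (by omega), if_neg (by omega)]
      exact hget0 p q (by omega) (by omega)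
  have hfin := outer_loop nn mm hnm (nn - 1) 2 _ (by omega) (by omega) (by
    have h23 : (2 : Nat) + 1 = 3 := rfl
    rw [h23]; exact hInv2)
  obtain ⟨_, hD, _⟩ := hfin
  apply hD
  unfold Dn
  omega

-- ---------- B side ----------
theorem colB_spec (j rmax : Nat) (cols : List (List Int)) (hrj : rmax ≤ j)
    (hcols : ∀ r, 2 ≤ r → r ≤ rmax → r ≠ j → (cols.getD r []).getD (j % r) 0 = fB (j % r) r) :
    colB j rmax cols = (List.range (rmax + 1)).map (fun r => fB r j) := by
  unfold colB
  suffices h : ∀ cnt, cnt ≤ rmax →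
      (List.range' 1 cnt).foldl (fun v r =>
        if r = j then v ++ [1]
        else if r = 1 then v ++ [(j : Int)]
        else
          let best := (List.range' 1 (r / 2)).foldl
              (fun acc k => min acc (v.getD k 0 + v.getD (r - k) 0)) 99
          let best := min best (((j / r : Nat) : Int) + (cols.getD r []).getD (j % r) 0)
          v ++ [best]) [0] = (List.range (cnt + 1)).map (fun r => fB r j) by
    exact h rmax le_rfl
  intro cnt
  induction cnt with
  | zero => intro _; simp [fB_zero]
  | succ c ih =>
    intro hle
    have hc := ih (by omega)
    rw [List.range'_1_concat, List.foldl_append, hc]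
    simp only [List.foldl_cons, List.foldl_nil]
    have hget : ∀ x, x ≤ c → ((List.range (c + 1)).map (fun r => fB r j)).getD x 0 = fB x j := by
      intro x hx
      rw [List.getD_eq_getElem _ _ (by simp; omega)]
      simp
    have hsnoc : ∀ v : Int, v = fB (c + 1) j →
        (List.range (c + 1)).map (fun r => fB r j) ++ [v]
          = (List.range (c + 1 + 1)).map (fun r => fB r j) := by
      intro v hv
      rw [hv, show List.range (c + 1 + 1) = List.range (c + 1) ++ [c + 1] from List.range_succ,
        List.map_append]
      simp
    have hr : 1 + c = c + 1 := by omega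
    rw [hr]
    by_cases hj : c + 1 = j
    · rw [if_pos hj]
      exact hsnoc 1 (by rw [← hj, fB_diag _ (by omega)])
    · rw [if_neg hj]
      by_cases h1 : c + 1 = 1
      · rw [if_pos h1]
        exact hsnoc _ (by rw [h1, fB_one j (by omega)])
      · rw [if_neg h1]
        have hfold : (List.range' 1 ((c + 1) / 2)).foldl
            (fun acc k => min acc (((List.range (c + 1)).map (fun r => fB r j)).getD k 0
              + ((List.range (c + 1)).map (fun r => fB r j)).getD (c + 1 - k) 0)) 99
            = (List.range' 1 ((c + 1) / 2)).foldl
            (fun acc k => min acc (fB k j + fB (c + 1 - k) j)) 99 := by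
          apply PySem.List.foldl_congr_mem
          intro acc k hk
          rcases List.mem_range'_1.mp hk with ⟨hk1, hk2⟩
          rw [hget k (by omega), hget (c + 1 - k) (by omega)]
        have hcol := hcols (c + 1) (by omega) (by omega) hj
        simp only [hfold, hcol]
        exact hsnoc _ (fB_step (c + 1) j (by omega) hj).symm

theorem cols_spec (nn : Nat) :
    ∀ (cnt : Nat) (acc : List (List Int)), cnt ≤ nn + 1 →
    (∀ r, 2 ≤ r → r < acc.length → acc.getD r [] = (List.range r).map (fun x => fB x r)) →
    (∀ c ∈ List.range' acc.length cnt, acc.length ≤ c) →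
    ∀ r, 2 ≤ r → r < ((List.range' acc.length cnt).foldl (fun cols c => cols ++ [colB c (c - 1) cols]) acc).length →
    ((List.range' acc.length cnt).foldl (fun cols c => cols ++ [colB c (c - 1) cols]) acc).getD r []
      = (List.range r).map (fun x => fB x r) := by
  intro cnt
  induction cnt with
  | zero => intro acc _ hacc _ r hr hlen; simp at hlen ⊢; exact hacc r hr hlen
  | succ c ih =>
    intro acc hle hacc _ r hr hlen
    rw [List.range'_succ, List.foldl_cons]
    rw [List.range'_succ, List.foldl_cons] at hlen
    have hnew : ∀ r', 2 ≤ r' → r' < (acc ++ [colB acc.length (acc.length - 1) acc]).length →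
        (acc ++ [colB acc.length (acc.length - 1) acc]).getD r' [] = (List.range r').map (fun x => fB x r') := by
      intro r' hr' hlen'
      simp only [List.length_append, List.length_cons, List.length_nil] at hlen'
      rcases Nat.lt_or_ge r' acc.length with h | h
      · rw [List.getD_eq_getElem _ _ (by simp; omega), List.getElem_append_left h,
          ← List.getD_eq_getElem _ _ h]
        exact hacc r' hr' h
      · have hreq : r' = acc.length := by omega
        subst hreq
        rw [List.getD_eq_getElem _ _ (by simp), List.getElem_append_right le_rfl]
        simp only [Nat.sub_self, List.getElem_cons_zero]
        rw [colB_spec acc.length (acc.length - 1) acc (by omega) ?_]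
        · have h' : acc.length - 1 + 1 = acc.length := by omega
          rw [h']
        · intro s hs2 hsr _
          have hslen : s < acc.length := by omega
          rw [hacc s hs2 hslen]
          have hmod : acc.length % s < s := Nat.mod_lt _ (by omega)
          rw [List.getD_eq_getElem _ _ (by simp; omega)]
          simp
    have harr : acc.length + 1 = (acc ++ [colB acc.length (acc.length - 1) acc]).length := by simp
    rw [harr] at hlen ⊢
    exact ih _ (by omega) hnew (by intro c' hc'; rcases List.mem_range'_1.mp hc' with ⟨h, _⟩; omega) r hr hlen

theorem portB_eq_fB (nn mm : Nat) (hnm : nn ≤ mm) :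
    (colB mm nn ((List.range (nn + 1)).foldl (fun cols c => cols ++ [colB c (c - 1) cols]) [])).getD nn 0
      = fB nn mm := by
  have hrange : List.range (nn + 1) = List.range' 0 (nn + 1) := by
    rw [List.range_eq_range']
  have hcols : ∀ r, 2 ≤ r →
      r < ((List.range (nn + 1)).foldl (fun cols c => cols ++ [colB c (c - 1) cols]) ([] : List (List Int))).length →
      ((List.range (nn + 1)).foldl (fun cols c => cols ++ [colB c (c - 1) cols]) ([] : List (List Int))).getD r []
        = (List.range r).map (fun x => fB x r) := by
    rw [hrange]
    intro r hr hlen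
    exact cols_spec nn (nn + 1) [] le_rfl (by intro r _ h; simp at h) (by intro c hc; simp) r hr hlen
  have hlen : ((List.range (nn + 1)).foldl (fun cols c => cols ++ [colB c (c - 1) cols]) ([] : List (List Int))).length = nn + 1 := by
    rw [hrange]
    have : ∀ cnt (acc : List (List Int)),
        ((List.range' acc.length cnt).foldl (fun cols c => cols ++ [colB c (c - 1) cols]) acc).length = acc.length + cnt := by
      intro cnt
      induction cnt with
      | zero => simp
      | succ c ih =>
        intro acc
        rw [List.range'_succ, List.foldl_cons]
        have harr : acc.length + 1 = (acc ++ [colB acc.length (acc.length - 1) acc]).length := by simp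
        rw [harr, ih]
        simp; omega
    have h0 : (([] : List (List Int))).length = 0 := rfl
    calc _ = (([] : List (List Int))).length + (nn + 1) := by rw [← h0]; exact this (nn + 1) []
      _ = nn + 1 := by simp
  rw [colB_spec mm nn _ hnm ?_]
  · rw [List.getD_eq_getElem _ _ (by simp), List.getElem_map, List.getElem_range]
  · intro r hr2 hrn hrm
    rw [hcols r hr2 (by omega)]
    have hmod : mm % r < r := Nat.mod_lt _ (by omega)
    rw [List.getD_eq_getElem _ _ (by simp; omega)]
    simp

-- ===== VERDICT (by name: the statement is the Claim_ definition above) =====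
theorem minimumSquare_spec : Claim_unchanged_minimumSquare := by
  intro a b _ hPre hD
  rcases hPre with ⟨ha, hb⟩ | ⟨ha, hb⟩
  · simp only [minimumSquare, minimumSquare_alt]
    have h1 : 1 ≤ (min a b).toNat := by
      rcases le_total a b with h | h <;> simp [h] <;> omega
    have hnm : (min a b).toNat ≤ (max a b).toNat := by
      have := min_le_max (a := a) (b := b)
      omega
    rw [portA_eq_fB _ _ h1 hnm, portB_eq_fB _ _ hnm]
  · exact absurd ⟨ha, hb⟩ hD

theorem minimumSquare_changed : Claim_changed_minimumSquare := by
  unfold Claim_changed_minimumSquare; decide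

theorem minimumSquare_tight : Claim_exact_minimumSquare := by
  intro a b _ _ hD
  obtain ⟨ha, hb⟩ := hD; subst ha; subst hb
  decide
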